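-- pv_equiv track=rewrite | github.com/juanjoseexpositogonzalez/aoc25 | day05/main.py | extract_ingredients_ids
-- ===== SOURCE A (Python) =====
-- from typing import List, Final, Tuple
--
-- def extract_ingredients_ids(lines: List[str]) -> List[str]:
--     """Extract the ingredients ids from the input file.
--
--     Args:
--         lines (List[str]): A list of strings.
--     """
--     ingredients_ids: List[str] = []
--     start_extracting: bool = False
--     for line in lines:
--         if line == '\n':
--             start_extracting = True
--             continue
--         if start_extracting:
--             ingredients_ids.append(line.strip())
--     return ingredients_ids
-- ===== SOURCE B (Python) =====
-- def extract_ingredients_ids(lines):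
--     """Extract the ingredients ids from the input file."""
--     try:
--         idx = lines.index('\n')
--     except ValueError:
--         return []
--     return [l.strip() for l in lines[idx + 1:] if l != '\n']
-- ===== Notes on version B (the rewrite author's own statement) =====
-- stated objective: simpler
-- what changed: Replaces the stateful flag-carrying loop by locating the first blank line with list.index and then slicing off the prefix and processing the tail with one comprehension.
import Mathlib
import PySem

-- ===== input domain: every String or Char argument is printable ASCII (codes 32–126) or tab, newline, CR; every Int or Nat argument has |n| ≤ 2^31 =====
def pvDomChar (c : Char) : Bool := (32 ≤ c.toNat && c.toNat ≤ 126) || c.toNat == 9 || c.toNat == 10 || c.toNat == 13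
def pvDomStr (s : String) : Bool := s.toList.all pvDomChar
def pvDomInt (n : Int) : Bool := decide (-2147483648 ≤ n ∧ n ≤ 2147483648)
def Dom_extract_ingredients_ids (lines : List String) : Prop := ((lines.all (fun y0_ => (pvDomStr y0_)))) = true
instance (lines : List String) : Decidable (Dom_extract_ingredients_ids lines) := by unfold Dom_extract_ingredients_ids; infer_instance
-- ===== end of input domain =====

-- B replaces A's stateful flag-carrying loop by locating the first blank line and processing the slice after it (simpler decomposition).


-- ===== PORT A =====
-- loop body: state is (ingredients_ids, start_extracting)
def extractStepA (st : List String × Bool) (line : String) : List String × Bool :=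
  if line = "\n" then (st.1, true)
  else if st.2 then (st.1 ++ [PySem.Str.strip line], st.2)
  else st

def extract_ingredients_ids (lines : List String) : List String :=
  (lines.foldl extractStepA ([], false)).1

-- ===== PORT B =====
def extract_ingredients_ids_alt (lines : List String) : List String :=
  match PySem.List.index? lines "\n" with
  | none => []
  | some idx =>
      ((lines.drop (idx + 1)).filter (fun l => l != "\n")).map PySem.Str.strip

-- ===== PRECONDITION & SPEC =====
def Spec_extract_ingredients_ids (lines : List String) (out : List String) : Prop := out = extract_ingredients_ids_alt lines
instance (lines : List String) (out : List String) : Decidable (Spec_extract_ingredients_ids lines out) := by unfold Spec_extract_ingredients_ids; infer_instance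

-- ===== CLAIM (what is proved, stated in full; the proofs are below) =====
def Claim_equal_extract_ingredients_ids : Prop := ∀ (lines : List String), Dom_extract_ingredients_ids lines → Spec_extract_ingredients_ids lines (extract_ingredients_ids lines)

-- ===== LEMMAS AND PROOFS =====
theorem foldl_extracting (l : List String) (acc : List String) :
    (l.foldl extractStepA (acc, true)).1
      = acc ++ (l.filter (fun s => s != "\n")).map PySem.Str.strip := by
  induction l generalizing acc with
  | nil => simp
  | cons x l ih =>
      by_cases hx : x = "\n"
      · simp [List.foldl_cons, extractStepA, hx, ih]
      · simp [List.foldl_cons, extractStepA, hx, ih]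

theorem foldl_waiting (l : List String) (acc : List String) :
    (l.foldl extractStepA (acc, false)).1
      = acc ++ extract_ingredients_ids_alt l := by
  induction l generalizing acc with
  | nil => simp [extract_ingredients_ids_alt, PySem.List.index?]
  | cons x l ih =>
      by_cases hx : x = "\n"
      · subst hx
        rw [List.foldl_cons]
        simp only [extractStepA, if_true]
        rw [foldl_extracting]
        unfold extract_ingredients_ids_alt
        rw [PySem.List.index?_cons_self]
        simp
      · rw [List.foldl_cons]
        simp only [extractStepA, if_neg hx, Bool.false_eq_true, if_false]
        rw [ih acc]
        unfold extract_ingredients_ids_alt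
        rw [PySem.List.index?_cons_of_ne l hx]
        cases h : PySem.List.index? l "\n" with
        | none => simp
        | some i => simp [List.drop_succ_cons]

-- ===== VERDICT (by name: the statement is the Claim_ definition above) =====
theorem extract_ingredients_ids_spec : Claim_equal_extract_ingredients_ids := by
  intro lines _
  unfold Spec_extract_ingredients_ids extract_ingredients_ids
  simpa using foldl_waiting lines []
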